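-- pv_equiv track=rewrite | github.com/testzer0/AmbiQT | src/utils/sql.py | lower
-- ===== SOURCE A (Python) =====
-- def lower(s):
--     s = s.replace("``", "`")
--     lowers = ""
--     current_quote = None
--     for c in s:
--         if current_quote is None:
--             lowers += c.lower()
--             if c in ['"', '\'', '`']:
--                 current_quote = c
--         else:
--             lowers += c
--             if c == current_quote:
--                 current_quote = None
--     return lowers
-- ===== SOURCE B (Python) =====
-- QUOTES = '"\'`'
--
--
-- def lower(s):
--     # Region-wise: locate whole quoted literals with str.find and lowercase
--     # only the stretches between them (instead of a per-character state machine).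
--     s = s.replace("``", "`")
--     n = len(s)
--     parts = []
--     i = 0
--     while i < n:
--         j = min((p for p in (s.find(q, i) for q in QUOTES) if p != -1), default=n)
--         parts.append(s[i:j].lower())
--         if j == n:
--             break
--         q = s[j]
--         k = s.find(q, j + 1)
--         if k == -1:
--             parts.append(s[j:])
--             i = n
--         else:
--             parts.append(s[j:k + 1])
--             i = k + 1
--     return "".join(parts)
-- ===== Notes on version B (the rewrite author's own statement) =====
-- stated objective: alternative
-- what changed: B locates whole quoted literals region-wise with str.find (min of next-quote positions, then the matching close quote) and lowercases only the slices between them, instead of A's per-character quote-state machine.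
import Mathlib
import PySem

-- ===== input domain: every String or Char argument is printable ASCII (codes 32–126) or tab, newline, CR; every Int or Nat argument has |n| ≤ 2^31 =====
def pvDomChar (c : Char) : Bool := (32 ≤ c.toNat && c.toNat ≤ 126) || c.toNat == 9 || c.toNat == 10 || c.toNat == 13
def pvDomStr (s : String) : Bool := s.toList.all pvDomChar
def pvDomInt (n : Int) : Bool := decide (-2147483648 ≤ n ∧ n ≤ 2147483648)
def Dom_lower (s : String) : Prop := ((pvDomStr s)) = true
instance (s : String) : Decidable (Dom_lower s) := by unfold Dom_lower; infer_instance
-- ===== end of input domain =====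

-- B lowercases whole stretches between quoted literals located with str.find, instead of A's
-- per-character quote-state machine; objective: alternative (same cost, region-wise structure).

-- ===== PORT A =====
-- one step of A's for-loop: state = (lowers, current_quote)
def lowerStepA (st : String × Option Char) (c : Char) : String × Option Char :=
  match st.2 with
  | none =>
    let acc := st.1.push (PySem.Chars.lowerChar c)
    if c == '"' || c == '\'' || c == '`' then (acc, some c) else (acc, none)
  | some q =>
    let acc := st.1.push c
    if c == q then (acc, none) else (acc, some q)

def lower (s : String) : String :=
  let s := PySem.Str.replace s "``" "`"
  (s.toList.foldl lowerStepA ("", none)).1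

-- ===== PORT B =====
def quoteChars : List Char := ['"', '\'', '`']

-- j = min((p for p in (s.find(q, i) for q in QUOTES) if p != -1), default=n), on the suffix
def minQuoteIdx (cs : List Char) : Nat :=
  (quoteChars.filterMap (fun q =>
    let p := PySem.Chars.find cs [q]
    if p = -1 then none else some p.toNat)).foldr min cs.length

-- B's while-loop over the rest of the string; find from index i becomes find on the suffix
def lowerRegions (cs : List Char) : List Char :=
  if h : minQuoteIdx cs < cs.length then
    if PySem.Chars.find (cs.drop (minQuoteIdx cs + 1)) [cs[minQuoteIdx cs]] = -1 then
      -- no closing quote: parts.append(s[i:j].lower()); parts.append(s[j:])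
      PySem.Chars.lower (cs.take (minQuoteIdx cs)) ++ cs.drop (minQuoteIdx cs)
    else
      -- parts.append(s[i:j].lower()); parts.append(s[j:k+1]); continue from k+1
      PySem.Chars.lower (cs.take (minQuoteIdx cs)) ++
        (cs[minQuoteIdx cs] ::
          (cs.drop (minQuoteIdx cs + 1)).take
            ((PySem.Chars.find (cs.drop (minQuoteIdx cs + 1)) [cs[minQuoteIdx cs]]).toNat + 1)) ++
        lowerRegions ((cs.drop (minQuoteIdx cs + 1)).drop
            ((PySem.Chars.find (cs.drop (minQuoteIdx cs + 1)) [cs[minQuoteIdx cs]]).toNat + 1))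
  else
    PySem.Chars.lower (cs.take (minQuoteIdx cs))
termination_by cs.length
decreasing_by
  simp only [List.length_drop]
  omega

def lower_alt (s : String) : String :=
  let s := PySem.Str.replace s "``" "`"
  String.ofList (lowerRegions s.toList)

-- ===== PRECONDITION & SPEC =====
def Spec_lower (s : String) (out : String) : Prop := out = lower_alt s
instance (s : String) (out : String) : Decidable (Spec_lower s out) := by unfold Spec_lower; infer_instance

-- ===== CLAIM (what is proved, stated in full; the proofs are below) =====
def Claim_equal_lower : Prop := ∀ (s : String), Dom_lower s → Spec_lower s (lower s)

-- ===== LEMMAS AND PROOFS =====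

def isQ (c : Char) : Bool := c == '"' || c == '\'' || c == '`'

-- reference state machine over List Char
def specF : Option Char → List Char → List Char
  | _, [] => []
  | none, c :: t => PySem.Chars.lowerChar c :: specF (if isQ c then some c else none) t
  | some q, c :: t => c :: specF (if c == q then none else some q) t

-- ---- A's fold equals specF ----
theorem foldA_eq (l : List Char) : ∀ (acc : String) (st : Option Char),
    (l.foldl lowerStepA (acc, st)).1.toList = acc.toList ++ specF st l := by
  induction l with
  | nil => intro acc st; simp [specF]
  | cons c t ih =>
    intro acc st
    cases st with
    | none =>
      by_cases hq : isQ c = true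
      · simp only [isQ, Bool.or_eq_true, beq_iff_eq] at hq
        rcases hq with (rfl | rfl) | rfl <;> simp [lowerStepA, specF, isQ, ih]
      · simp only [isQ, Bool.or_eq_true, beq_iff_eq] at hq
        push Not at hq
        obtain ⟨⟨h1, h2⟩, h3⟩ := hq
        simp [lowerStepA, specF, isQ, h1, h2, h3, ih]
    | some q =>
      by_cases hc : c = q
      · subst hc; simp [lowerStepA, specF, ih]
      · simp [lowerStepA, specF, hc, ih]

-- ---- facts about specF ----
theorem specF_none_nonquote (pre : List Char) (rest : List Char)
    (h : ∀ c ∈ pre, isQ c = false) :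
    specF none (pre ++ rest) = pre.map PySem.Chars.lowerChar ++ specF none rest := by
  induction pre with
  | nil => simp
  | cons c t ih =>
    have hc : isQ c = false := h c (by simp)
    simp [specF, hc, ih (fun x hx => h x (by simp [hx]))]

theorem specF_some_no_close (q : Char) (t : List Char) (h : q ∉ t) :
    specF (some q) t = t := by
  induction t with
  | nil => rfl
  | cons c r ih =>
    have hc : (c == q) = false := by
      simp only [beq_eq_false_iff_ne]; rintro rfl; exact h (by simp)
    simp [specF, hc, ih (fun hm => h (by simp [hm]))]

theorem specF_some_close (q : Char) (t1 t2 : List Char) (h : q ∉ t1) :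
    specF (some q) (t1 ++ q :: t2) = t1 ++ q :: specF none t2 := by
  induction t1 with
  | nil => simp [specF]
  | cons c r ih =>
    have hc : (c == q) = false := by
      simp only [beq_eq_false_iff_ne]; rintro rfl; exact h (by simp)
    simp [specF, hc, ih (fun hm => h (by simp [hm]))]

-- quote chars are fixed points of lowerChar
theorem lowerChar_quote (q : Char) (h : isQ q = true) :
    PySem.Chars.lowerChar q = q := by
  simp only [isQ, Bool.or_eq_true, beq_iff_eq] at h
  rcases h with (rfl | rfl) | rfl <;> decide

theorem mem_quote_isQ (q : Char) : q ∈ quoteChars ↔ isQ q = true := by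
  simp [quoteChars, isQ, or_assoc]

-- ---- characterising PySem.Chars.find for a single character ----
theorem find_single_neg (cs : List Char) (q : Char) :
    PySem.Chars.find cs [q] = -1 ↔ q ∉ cs := by
  rw [PySem.Chars.find_eq_neg_one_iff]
  constructor
  · intro h hm
    obtain ⟨u, v, rfl⟩ := List.append_of_mem hm
    exact h ⟨u, v, by simp⟩
  · intro h hi
    exact h (hi.subset (by simp))

theorem prefix_single (q : Char) (l : List Char) :
    [q] <+: l ↔ l.head? = some q := by
  constructor
  · rintro ⟨t, rfl⟩; rfl
  · intro h
    cases l with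
    | nil => simp at h
    | cons c t => simp at h; subst h; exact ⟨t, rfl⟩

theorem find_single_spec (cs : List Char) (q : Char)
    (h : ¬ PySem.Chars.find cs [q] = -1) :
    cs[(PySem.Chars.find cs [q]).toNat]? = some q ∧
    ∀ i < (PySem.Chars.find cs [q]).toNat, cs[i]? ≠ some q := by
  have h0 : 0 ≤ PySem.Chars.find cs [q] := by
    have := PySem.Chars.neg_one_le_find (s := cs) (sub := [q])
    omega
  obtain ⟨h1, h2⟩ := PySem.Chars.find_spec (s := cs) (sub := [q]) h0
  refine ⟨?_, fun i hi hm => h2 i hi ?_⟩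
  · have := (prefix_single q _).1 h1
    rwa [List.head?_drop] at this
  · rw [prefix_single, List.head?_drop]; exact hm

-- ---- foldr min helpers ----
theorem foldr_min_le_default (l : List Nat) (d : Nat) : l.foldr min d ≤ d := by
  induction l with
  | nil => simp
  | cons x t ih => simpa using Or.inr ih

theorem foldr_min_le_mem (l : List Nat) (d x : Nat) (h : x ∈ l) : l.foldr min d ≤ x := by
  induction l with
  | nil => simp at h
  | cons y t ih =>
    rcases List.mem_cons.1 h with rfl | hm
    · simp
    · simpa using Or.inr (ih hm)

theorem le_foldr_min (l : List Nat) (d a : Nat) (hl : ∀ x ∈ l, a ≤ x) (hd : a ≤ d) :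
    a ≤ l.foldr min d := by
  induction l with
  | nil => simpa
  | cons x t ih =>
    simp only [List.foldr_cons, le_min_iff]
    exact ⟨hl x (by simp), ih (fun y hy => hl y (by simp [hy]))⟩

-- first char after the takeWhile-prefix fails the predicate
theorem takeWhile_boundary (p : Char → Bool) :
    ∀ (l : List Char) (h : (l.takeWhile p).length < l.length),
      p (l[(l.takeWhile p).length]'h) = false := by
  intro l
  induction l with
  | nil => intro h; simp at h
  | cons c t ih =>
    intro h
    by_cases hpc : p c = true
    · simp only [List.takeWhile_cons, hpc, if_true, List.length_cons, List.getElem_cons_succ]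
      exact ih (by simpa [List.takeWhile_cons, hpc] using h)
    · simp only [Bool.not_eq_true] at hpc
      simp [hpc]

-- minQuoteIdx = length of the non-quote prefix
theorem j_eq_takeWhile (cs : List Char) :
    minQuoteIdx cs = (cs.takeWhile (fun c => !isQ c)).length := by
  unfold minQuoteIdx
  set tw := (cs.takeWhile (fun c => !isQ c)).length with htw
  have htwle : tw ≤ cs.length := (List.takeWhile_prefix _).length_le
  have hpref : cs.takeWhile (fun c => !isQ c) <+: cs := List.takeWhile_prefix _
  have hmem : ∀ m ∈ quoteChars.filterMap (fun q =>
      let p := PySem.Chars.find cs [q]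
      if p = -1 then none else some p.toNat), tw ≤ m := by
    intro m hm
    simp only [List.mem_filterMap] at hm
    obtain ⟨q, hq, hval⟩ := hm
    by_cases hne : PySem.Chars.find cs [q] = -1
    · simp [hne] at hval
    · rw [if_neg hne] at hval
      simp only [Option.some.injEq] at hval
      subst hval
      obtain ⟨h1, _⟩ := find_single_spec cs q hne
      obtain ⟨hmlt, hgm⟩ := List.getElem?_eq_some_iff.1 h1
      by_contra hlt
      push Not at hlt
      have hx : (cs.takeWhile (fun c => !isQ c))[(PySem.Chars.find cs [q]).toNat]'(by omega)
          = cs[(PySem.Chars.find cs [q]).toNat]'hmlt := hpref.getElem (by omega)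
      have hmemtw : cs[(PySem.Chars.find cs [q]).toNat]'hmlt ∈ cs.takeWhile (fun c => !isQ c) := by
        rw [← hx]; exact List.getElem_mem _
      have := List.mem_takeWhile_imp hmemtw
      rw [hgm] at this
      rw [(mem_quote_isQ q).1 hq] at this
      simp at this
  apply le_antisymm
  · by_cases h1 : tw < cs.length
    · have hq0 : isQ (cs[tw]'h1) = true := by
        have := takeWhile_boundary (fun c => !isQ c) cs (htw ▸ h1)
        simpa using this
      set q0 := cs[tw]'h1 with hq0def
      have hne : ¬ PySem.Chars.find cs [q0] = -1 := by
        rw [find_single_neg]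
        simp only [not_not]
        exact List.getElem_mem h1
      have hminforall : ∀ i < (PySem.Chars.find cs [q0]).toNat, cs[i]? ≠ some q0 :=
        (find_single_spec cs q0 hne).2
      have hle : (PySem.Chars.find cs [q0]).toNat ≤ tw := by
        by_contra hlt
        push Not at hlt
        exact hminforall tw hlt (by rw [List.getElem?_eq_getElem h1])
      have hmem0 : (PySem.Chars.find cs [q0]).toNat ∈ quoteChars.filterMap (fun q =>
          let p := PySem.Chars.find cs [q]
          if p = -1 then none else some p.toNat) := by
        simp only [List.mem_filterMap]
        exact ⟨q0, (mem_quote_isQ q0).2 hq0, by rw [if_neg hne]⟩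
      exact le_trans (foldr_min_le_mem _ _ _ hmem0) hle
    · have : tw = cs.length := le_antisymm htwle (by omega)
      rw [← this] at *
      exact foldr_min_le_default _ _
  · exact le_foldr_min _ _ _ hmem htwle

theorem take_tw_eq (cs : List Char) :
    cs.take (cs.takeWhile (fun c => !isQ c)).length = cs.takeWhile (fun c => !isQ c) :=
  (List.prefix_iff_eq_take.mp (List.takeWhile_prefix _)).symm

-- ---- the main characterisation: lowerRegions = specF none ----
theorem lowerRegions_eq_aux (n : Nat) : ∀ (cs : List Char), cs.length ≤ n →
    lowerRegions cs = specF none cs := by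
  induction n with
  | zero =>
    intro cs h
    have hnil : cs = [] := List.eq_nil_of_length_eq_zero (Nat.le_zero.mp h)
    subst hnil
    rw [lowerRegions]
    simp [minQuoteIdx, specF, PySem.Chars.lower]
  | succ n ih =>
    intro cs hlen
    rw [lowerRegions]
    have hjtw := j_eq_takeWhile cs
    set tw := (cs.takeWhile (fun c => !isQ c)).length with htwdef
    have htwle : tw ≤ cs.length := (List.takeWhile_prefix _).length_le
    have hprene : ∀ c ∈ cs.takeWhile (fun c => !isQ c), isQ c = false := by
      intro c hc
      have := List.mem_takeWhile_imp hc
      simpa using this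
    simp only [hjtw]
    by_cases h1 : tw < cs.length
    · rw [dif_pos h1]
      set q := cs[tw]'h1 with hqdef
      have hq : isQ q = true := by
        have := takeWhile_boundary (fun c => !isQ c) cs h1
        simpa [← hqdef] using this
      set rest := cs.drop (tw + 1) with hrestdef
      have hdroptw : cs.drop tw = q :: rest := (List.getElem_cons_drop ..).symm
      have hsplit : cs = cs.takeWhile (fun c => !isQ c) ++ (q :: rest) := by
        conv_lhs => rw [← List.take_append_drop tw cs]
        rw [take_tw_eq, hdroptw]
      have hspec : specF none cs
          = (cs.takeWhile (fun c => !isQ c)).map PySem.Chars.lowerChar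
            ++ (q :: specF (some q) rest) := by
        conv_lhs => rw [hsplit]
        rw [specF_none_nonquote _ _ hprene]
        simp [specF, hq, lowerChar_quote q hq]
      by_cases h2 : PySem.Chars.find rest [q] = -1
      · rw [if_pos h2, hspec, specF_some_no_close q rest ((find_single_neg rest q).1 h2)]
        rw [take_tw_eq, hdroptw]
        simp [PySem.Chars.lower]
      · rw [if_neg h2]
        obtain ⟨hk1, hk2⟩ := find_single_spec rest q h2
        set k := (PySem.Chars.find rest [q]).toNat with hkdef
        obtain ⟨hklt, hgk⟩ := List.getElem?_eq_some_iff.1 hk1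
        have hdk : rest.drop k = rest[k]'hklt :: rest.drop (k + 1) :=
          (List.getElem_cons_drop ..).symm
        have hrestsplit : rest = rest.take k ++ q :: rest.drop (k + 1) := by
          conv_lhs => rw [← List.take_append_drop k rest]
          rw [hdk, hgk]
        have hnotmem : q ∉ rest.take k := by
          intro hm
          rw [List.mem_take_iff_getElem] at hm
          obtain ⟨i, hi, hgi⟩ := hm
          exact hk2 i (by omega) (by rw [List.getElem?_eq_getElem (by omega)]; simpa using hgi)
        have htakek : rest.take (k + 1) = rest.take k ++ [q] := by
          rw [List.take_add_one, hk1]; rfl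
        have hih : lowerRegions (rest.drop (k + 1)) = specF none (rest.drop (k + 1)) := by
          apply ih
          have : rest.length = cs.length - (tw + 1) := by simp [hrestdef]
          simp only [List.length_drop]
          omega
        rw [hspec, hih, take_tw_eq, htakek]
        conv_rhs => rw [hrestsplit]
        rw [specF_some_close q _ _ hnotmem]
        simp [PySem.Chars.lower]
    · rw [dif_neg h1]
      have htweq : tw = cs.length := le_antisymm htwle (by omega)
      have hfull : cs.takeWhile (fun c => !isQ c) = cs :=
        (List.takeWhile_prefix _).eq_of_length htweq
      have : specF none cs = cs.map PySem.Chars.lowerChar := by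
        conv_lhs => rw [← List.append_nil cs]
        rw [specF_none_nonquote cs [] (fun c hc => hprene c (by rw [hfull]; exact hc))]
        simp [specF]
      rw [this, take_tw_eq, hfull]
      simp [PySem.Chars.lower]

-- ===== VERDICT (by name: the statement is the Claim_ definition above) =====
theorem lower_spec : Claim_equal_lower := by
  intro s _
  show lower s = lower_alt s
  show ((PySem.Str.replace s "``" "`").toList.foldl lowerStepA ("", none)).1
      = String.ofList (lowerRegions (PySem.Str.replace s "``" "`").toList)
  apply String.toList_inj.mp
  rw [foldA_eq, lowerRegions_eq_aux (PySem.Str.replace s "``" "`").toList.length _ le_rfl]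
  simp
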